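-- pv_equiv track=rewrite | github.com/Valentyn-Oliinyk/telegram-bot-collector | export_jsonl.py | group_messages_into_conversations
-- ===== SOURCE A (Python) =====
-- def group_messages_into_conversations(messages: list, max_context_length: int = 10) -> list:
--     """
--     Групує повідомлення в розмови (контекстні вікна)
--
--     Args:
--         messages: Список всіх повідомлень
--         max_context_length: Максимальна кількість повідомлень в одній розмові
--
--     Returns:
--         Список розмов, кожна розмова - список повідомлень
--     """
--     conversations = []
--     current_conversation = []
--
--     for i, msg in enumerate(messages):
--         current_conversation.append(msg)
--
--         # Якщо досягли максимальної довжини або це останнє повідомлення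
--         if len(current_conversation) >= max_context_length or i == len(messages) - 1:
--             # Перевіряємо що розмова має принаймні одну пару user-assistant
--             if len(current_conversation) >= 2:
--                 conversations.append(current_conversation.copy())
--
--             # Зберігаємо перекриття для контексту (останні 2 повідомлення)
--             if len(current_conversation) >= 4:
--                 current_conversation = current_conversation[-2:]
--             else:
--                 current_conversation = []
--
--     return conversations
-- ===== SOURCE B (Python) =====
-- def group_messages_into_conversations(messages: list, max_context_length: int = 10) -> list:
--     """Index pass over window start positions instead of a mutated buffer."""
--     if max_context_length < 2:
--         return []
--     conversations = []
--     i, n = 0, len(messages)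
--     while i < n:
--         end = min(i + max_context_length, n)
--         window = messages[i:end]
--         if len(window) >= 2:
--             conversations.append(window)
--         if end >= n:
--             break
--         i = end - 2 if len(window) >= 4 else end
--     return conversations
-- ===== Notes on version B (the rewrite author's own statement) =====
-- stated objective: alternative
-- what changed: B replaces A's message-by-message mutated buffer with an index pass over window start positions, slicing each window messages[i:min(i+max,n)] directly and stepping the start by the window length (minus the 2-message overlap for long windows); the max_context_length < 2 guard reflects that no window of at least 2 messages exists then.
import Mathlib
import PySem

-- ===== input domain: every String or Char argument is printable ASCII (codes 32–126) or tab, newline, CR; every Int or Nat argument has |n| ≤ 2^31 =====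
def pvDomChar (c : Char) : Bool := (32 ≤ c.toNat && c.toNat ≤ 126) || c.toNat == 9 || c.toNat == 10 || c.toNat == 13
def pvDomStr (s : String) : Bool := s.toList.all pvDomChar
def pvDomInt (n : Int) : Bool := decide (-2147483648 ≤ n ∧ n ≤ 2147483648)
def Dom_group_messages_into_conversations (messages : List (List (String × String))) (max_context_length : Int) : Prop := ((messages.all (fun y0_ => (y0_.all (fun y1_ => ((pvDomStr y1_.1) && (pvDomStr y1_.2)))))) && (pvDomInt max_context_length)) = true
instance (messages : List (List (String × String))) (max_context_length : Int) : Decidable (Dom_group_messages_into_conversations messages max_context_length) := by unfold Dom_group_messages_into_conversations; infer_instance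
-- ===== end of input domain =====

-- B replaces A's mutated message buffer with a pass over window start indices that slices
-- each conversation window directly (objective: alternative decomposition, same cost).


-- ===== PORT A =====
-- A's loop over `enumerate(messages)` with mutable `conversations`/`current_conversation`,
-- transcribed as structural recursion over the remaining messages; `i == len(messages) - 1`
-- is exactly `rest = []`, and `current_conversation[-2:]` (only reached with length ≥ 4)
-- is `drop (length - 2)`.
def aGo (max_context_length : Int) (conversations : List (List (List (String × String))))
    (current : List (List (String × String))) :
    List (List (String × String)) → List (List (List (String × String)))
  | [] => conversations
  | m :: rest =>
    let cur := current ++ [m]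
    if ((cur.length : Int) ≥ max_context_length) ∨ rest = [] then
      aGo max_context_length
        (if cur.length ≥ 2 then conversations ++ [cur] else conversations)
        (if cur.length ≥ 4 then cur.drop (cur.length - 2) else []) rest
    else
      aGo max_context_length conversations cur rest

def group_messages_into_conversations (messages : List (List (String × String))) (max_context_length : Int) : List (List (List (String × String))) :=
  aGo max_context_length [] [] messages

-- ===== PORT B =====
-- B's while loop over window start positions, transcribed on the suffix messages[i:]
-- (so `end = min(i+max, n)` becomes `e = min max (length msgs)` and `messages[i:end]`
-- becomes `take e`); the `2 ≤ maxN` argument is the `max_context_length < 2` guard,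
-- needed only for termination.
def bGo (maxN : Nat) (hmax : 2 ≤ maxN) (msgs : List (List (String × String))) :
    List (List (List (String × String))) :=
  -- Source B's locals `end`/`window` are inlined: `end - i` is `min maxN msgs.length`
  -- and `window` is `msgs.take (min maxN msgs.length)`.
  if hn : msgs = [] then []
  else if he : min maxN msgs.length ≥ msgs.length then
    (if (msgs.take (min maxN msgs.length)).length ≥ 2 then [msgs.take (min maxN msgs.length)] else [])
  else
    (if (msgs.take (min maxN msgs.length)).length ≥ 2 then [msgs.take (min maxN msgs.length)] else []) ++
    bGo maxN hmax (msgs.drop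
      (if (msgs.take (min maxN msgs.length)).length ≥ 4 then min maxN msgs.length - 2
       else min maxN msgs.length))
termination_by msgs.length
decreasing_by
  have hw : (List.take (min maxN msgs.length) msgs).length = min maxN msgs.length := by
    simp
  have hn' : msgs.length ≠ 0 := fun h => hn (List.eq_nil_of_length_eq_zero h)
  simp only [List.length_drop]
  split <;> omega

def group_messages_into_conversations_alt (messages : List (List (String × String))) (max_context_length : Int) : List (List (List (String × String))) :=
  if h : max_context_length < 2 then []
  else bGo max_context_length.toNat (by omega) messages

-- ===== PRECONDITION & SPEC =====
def Spec_group_messages_into_conversations (messages : List (List (String × String))) (max_context_length : Int) (out : List (List (List (String × String)))) : Prop := out = group_messages_into_conversations_alt messages max_context_length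
instance (messages : List (List (String × String))) (max_context_length : Int) (out : List (List (List (String × String)))) : Decidable (Spec_group_messages_into_conversations messages max_context_length out) := by unfold Spec_group_messages_into_conversations; infer_instance

-- ===== CLAIM (what is proved, stated in full; the proofs are below) =====
def Claim_equal_group_messages_into_conversations : Prop := ∀ (messages : List (List (String × String))) (max_context_length : Int), Dom_group_messages_into_conversations messages max_context_length → Spec_group_messages_into_conversations messages max_context_length (group_messages_into_conversations messages max_context_length)

-- ===== LEMMAS AND PROOFS =====

-- With max_context_length < 2 every step of A's loop flushes a singleton buffer
-- (never emitted, never kept), so A returns the accumulated conversations unchanged.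
lemma aGo_small (max_context_length : Int) (hm : max_context_length < 2) :
    ∀ (msgs : List (List (String × String))) (convs : List (List (List (String × String)))),
      aGo max_context_length convs [] msgs = convs := by
  intro msgs
  induction msgs with
  | nil => intro convs; rfl
  | cons m rest ih =>
    intro convs
    rw [aGo]
    have hc : ((([] ++ [m] : List (List (String × String))).length : Int) ≥ max_context_length)
        ∨ rest = [] := Or.inl (by simp; omega)
    rw [if_pos hc]
    norm_num
    exact ih convs

-- Main invariant: A's loop state (accumulated output, partial buffer `cur`) with the
-- not-yet-consumed suffix `rest` computes the accumulated output followed by B's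
-- windows of `cur ++ rest`, as long as the buffer is strictly shorter than the cap.
lemma aGo_eq_bGo (maxN : Nat) (hmax : 2 ≤ maxN) :
    ∀ (rest cur : List (List (String × String)))
      (convs : List (List (List (String × String)))),
      cur.length < maxN → rest ≠ [] →
      aGo (maxN : Int) convs cur rest = convs ++ bGo maxN hmax (cur ++ rest) := by
  intro rest
  induction rest with
  | nil => intro cur convs _ h; exact absurd rfl h
  | cons m rest' ih =>
    intro cur convs hcur _
    rw [aGo]
    rcases eq_or_ne rest' [] with hre | hre
    · -- last message: A flushes because the suffix ends; B's window is the whole rest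
      subst hre
      have hc : (((cur ++ [m]).length : Int) ≥ (maxN : Int)) ∨ ([] : List (List (String × String))) = [] :=
        Or.inr rfl
      rw [if_pos hc, aGo]
      rw [bGo]
      have hne : ¬ (cur ++ [m] = []) := by simp
      rw [dif_neg hne]
      have hlen : (cur ++ [m]).length = cur.length + 1 := by simp
      have he : min maxN (cur ++ [m]).length = (cur ++ [m]).length := by omega
      simp only [he, List.take_length, ge_iff_le, le_refl, dif_pos]
      split_ifs with h2 <;> simp
    · by_cases h4 : ((cur ++ [m]).length : Int) ≥ (maxN : Int)
      · -- buffer reached the cap: A flushes the window cur ++ [m] (length = maxN)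
        have hlen : (cur ++ [m]).length = maxN := by
          have : (cur ++ [m]).length = cur.length + 1 := by simp
          omega
        rw [if_pos (Or.inl h4)]
        have h2 : (cur ++ [m]).length ≥ 2 := by omega
        rw [if_pos h2]
        -- B on cur ++ m :: rest' : window = cur ++ [m], then recurse past the overlap
        have hsplit : cur ++ m :: rest' = (cur ++ [m]) ++ rest' := by simp
        rw [hsplit, bGo]
        have hne : ¬ ((cur ++ [m]) ++ rest' = []) := by simp
        rw [dif_neg hne]
        have hn : ((cur ++ [m]) ++ rest').length = maxN + rest'.length := by
          have h := hlen
          simp only [List.length_append, List.length_cons, List.length_nil] at h ⊢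
          omega
        have hre' : rest'.length ≠ 0 := fun h => hre (List.eq_nil_of_length_eq_zero h)
        have he : min maxN ((cur ++ [m]) ++ rest').length = maxN := by omega
        rw [he]
        have htake : ((cur ++ [m]) ++ rest').take maxN = cur ++ [m] := by
          rw [← hlen]; exact List.take_left
        rw [htake]
        have hge : ¬ (maxN ≥ ((cur ++ [m]) ++ rest').length) := by omega
        rw [dif_neg hge]
        rw [if_pos (by omega : (cur ++ [m]).length ≥ 2)]
        by_cases h44 : (cur ++ [m]).length ≥ 4
        · rw [if_pos h44, if_pos h44]
          have hdrop : ((cur ++ [m]) ++ rest').drop (maxN - 2)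
              = (cur ++ [m]).drop ((cur ++ [m]).length - 2) ++ rest' := by
            rw [hlen, List.drop_append_of_le_length (by omega)]
          rw [hdrop]
          have hcur' : ((cur ++ [m]).drop ((cur ++ [m]).length - 2)).length < maxN := by
            simp only [List.length_drop]; omega
          rw [ih _ _ hcur' hre]
          simp
        · rw [if_neg h44, if_neg h44]
          have hdrop : ((cur ++ [m]) ++ rest').drop maxN = rest' := by
            rw [← hlen, List.drop_left]
          rw [hdrop]
          have h0 : ([] : List (List (String × String))).length < maxN := by simp; omega
          rw [ih _ _ h0 hre]
          simp
      · -- buffer still short: A just appends the message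
        rw [if_neg (by tauto)]
        have hcur' : (cur ++ [m]).length < maxN := by
          have : (cur ++ [m]).length = cur.length + 1 := by simp
          omega
        rw [ih _ _ hcur' hre]
        simp

-- ===== VERDICT (by name: the statement is the Claim_ definition above) =====
theorem group_messages_into_conversations_spec : Claim_equal_group_messages_into_conversations := by
  intro messages max_context_length _
  unfold Spec_group_messages_into_conversations
  unfold group_messages_into_conversations group_messages_into_conversations_alt
  by_cases h : max_context_length < 2
  · rw [dif_pos h, aGo_small _ h]
  · rw [dif_neg h]
    rcases eq_or_ne messages [] with hm | hm
    · subst hm; rw [bGo]; simp [aGo]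
    · have hcast : ((max_context_length.toNat : Nat) : Int) = max_context_length := by omega
      have := aGo_eq_bGo max_context_length.toNat (by omega) messages [] []
        (by simp; omega) hm
      rw [hcast] at this
      simpa using this
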